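-- pv_equiv track=rewrite | github.com/NazarZhulevych/GOIT_HM_MODULE_05 | main_old.py | filter_logs_by_level
-- ===== SOURCE A (Python) =====
-- def count_logs_by_level(logs: list) -> dict:
--     """Counts log occurrences by level."""
--     level_count = {"INFO": 0, "ERROR": 0, "DEBUG": 0, "WARNING": 0}
--
--     for log in logs:
--         log_level = log["level"]
--         if log_level in level_count:
--             level_count[log_level] += 1
--
--     return level_count  # Now correctly returns a count dictionary
--
-- def filter_logs_by_level(logs: list) -> dict:
--     """Filters logs by level and returns a count dictionary."""
--     info_list = []
--     error_list = []
--     debug_list = []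
--     warning_list = []
--
--     for log in logs:
--         if log.get("level") == "INFO":
--             info_list.append(log)
--         elif log.get("level") == "ERROR":
--             error_list.append(log)
--         elif log.get("level") == "DEBUG":
--             debug_list.append(log)
--         elif log.get("level") == "WARNING":
--             warning_list.append(log)
--
--     # Count logs by level
--     return {
--         "INFO": count_logs_by_level(info_list),
--         "ERROR": count_logs_by_level(error_list),
--         "DEBUG": count_logs_by_level(debug_list),
--         "WARNING": count_logs_by_level(warning_list),
--     }
-- ===== SOURCE B (Python) =====
-- def filter_logs_by_level(logs: list) -> dict:
--     """Filters logs by level and returns a count dictionary."""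
--     levels = ["INFO", "ERROR", "DEBUG", "WARNING"]
--     counts = {level: 0 for level in levels}
--     for log in logs:
--         lvl = log.get("level")
--         if lvl in counts:
--             counts[lvl] += 1
--     return {
--         outer: {inner: (counts[outer] if inner == outer else 0) for inner in levels}
--         for outer in levels
--     }
-- ===== Notes on version B (the rewrite author's own statement) =====
-- stated objective: simpler
-- what changed: Instead of materializing four per-level lists and re-counting each with a helper (split-then-count), B counts all levels in one flat pass with .get and then constructs the nested diagonal result directly in a comprehension.
import Mathlib
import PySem

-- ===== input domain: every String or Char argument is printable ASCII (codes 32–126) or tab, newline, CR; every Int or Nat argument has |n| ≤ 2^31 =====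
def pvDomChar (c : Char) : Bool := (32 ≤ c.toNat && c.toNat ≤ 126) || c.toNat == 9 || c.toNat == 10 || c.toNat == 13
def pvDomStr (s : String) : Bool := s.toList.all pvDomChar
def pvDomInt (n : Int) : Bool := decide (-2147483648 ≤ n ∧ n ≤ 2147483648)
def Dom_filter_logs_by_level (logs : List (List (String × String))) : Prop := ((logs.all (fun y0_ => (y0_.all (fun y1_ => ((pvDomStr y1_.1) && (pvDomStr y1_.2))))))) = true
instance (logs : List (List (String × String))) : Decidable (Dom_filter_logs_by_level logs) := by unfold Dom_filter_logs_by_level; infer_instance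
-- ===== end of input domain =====

-- B changes the decomposition only (count once in a flat pass, then build the nested diagonal dict); same result, both total.

-- ===== PORT A =====
-- the fresh {"INFO":0,"ERROR":0,"DEBUG":0,"WARNING":0} the helper starts from
def pvInitCount : PySem.Dict String Int :=
  PySem.Dict.ofList [("INFO", 0), ("ERROR", 0), ("DEBUG", 0), ("WARNING", 0)]

-- loop body of count_logs_by_level: log["level"] is ported via .getD "" — at every call site of A
-- the key "level" is present (the lists were filtered on it), so the default is never used.
def pvCountStep (level_count : PySem.Dict String Int) (log : List (String × String)) :
    PySem.Dict String Int :=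
  let log_level := ((PySem.Dict.mk log).get? "level").getD ""
  if level_count.contains log_level then level_count.modify log_level 0 (· + 1)
  else level_count

def count_logs_by_level (logs : List (List (String × String))) : PySem.Dict String Int :=
  logs.foldl pvCountStep pvInitCount

-- loop body of filter_logs_by_level: the if/elif chain appending to the four lists
def pvSplitStep
    (st : List (List (String × String)) × List (List (String × String)) ×
          List (List (String × String)) × List (List (String × String)))
    (log : List (String × String)) :
    List (List (String × String)) × List (List (String × String)) ×
    List (List (String × String)) × List (List (String × String)) :=
  let g := (PySem.Dict.mk log).get? "level"
  if g == some "INFO" then (st.1 ++ [log], st.2.1, st.2.2.1, st.2.2.2)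
  else if g == some "ERROR" then (st.1, st.2.1 ++ [log], st.2.2.1, st.2.2.2)
  else if g == some "DEBUG" then (st.1, st.2.1, st.2.2.1 ++ [log], st.2.2.2)
  else if g == some "WARNING" then (st.1, st.2.1, st.2.2.1, st.2.2.2 ++ [log])
  else st

def filter_logs_by_level (logs : List (List (String × String))) : List (String × List (String × Int)) :=
  let lists := logs.foldl pvSplitStep ([], [], [], [])
  [("INFO", (count_logs_by_level lists.1).items),
   ("ERROR", (count_logs_by_level lists.2.1).items),
   ("DEBUG", (count_logs_by_level lists.2.2.1).items),
   ("WARNING", (count_logs_by_level lists.2.2.2).items)]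

-- ===== PORT B =====
def pvLevels : List String := ["INFO", "ERROR", "DEBUG", "WARNING"]

-- loop body of B: lvl = log.get("level"); if lvl in counts: counts[lvl] += 1
def pvAltStep (counts : PySem.Dict String Int) (log : List (String × String)) :
    PySem.Dict String Int :=
  match (PySem.Dict.mk log).get? "level" with
  | some lvl => if counts.contains lvl then counts.modify lvl 0 (· + 1) else counts
  | none => counts

def filter_logs_by_level_alt (logs : List (List (String × String))) : List (String × List (String × Int)) :=
  let counts := logs.foldl pvAltStep
    (PySem.Dict.ofList (pvLevels.map (fun level => (level, (0 : Int)))))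
  pvLevels.map (fun outer =>
    (outer, pvLevels.map (fun inner => (inner, if inner == outer then counts.getD outer 0 else 0))))

-- ===== PRECONDITION & SPEC =====
def Spec_filter_logs_by_level (logs : List (List (String × String))) (out : List (String × List (String × Int))) : Prop := out = filter_logs_by_level_alt logs
instance (logs : List (List (String × String))) (out : List (String × List (String × Int))) : Decidable (Spec_filter_logs_by_level logs out) := by unfold Spec_filter_logs_by_level; infer_instance

-- ===== CLAIM (what is proved, stated in full; the proofs are below) =====
def Claim_equal_filter_logs_by_level : Prop := ∀ (logs : List (List (String × String))), Dom_filter_logs_by_level logs → Spec_filter_logs_by_level logs (filter_logs_by_level logs)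

-- ===== LEMMAS AND PROOFS =====

-- the level a log reads out (log.get("level"))
def pvG (log : List (String × String)) : Option String := (PySem.Dict.mk log).get? "level"

-- A's split loop produces the four filtered sublists
lemma pv_split_loop (logs : List (List (String × String)))
    (i e d w : List (List (String × String))) :
    logs.foldl pvSplitStep (i, e, d, w) =
      (i ++ logs.filter (fun l => pvG l == some "INFO"),
       e ++ logs.filter (fun l => pvG l == some "ERROR"),
       d ++ logs.filter (fun l => pvG l == some "DEBUG"),
       w ++ logs.filter (fun l => pvG l == some "WARNING")) := by
  induction logs generalizing i e d w with
  | nil => simp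
  | cons x l ih =>
    rw [List.foldl_cons]
    have hg : (PySem.Dict.mk x).get? "level" = pvG x := rfl
    by_cases h1 : pvG x = some "INFO"
    · rw [show pvSplitStep (i, e, d, w) x = (i ++ [x], e, d, w) from by
        unfold pvSplitStep; rw [hg]; simp [h1]]
      simp [ih, h1]
    · by_cases h2 : pvG x = some "ERROR"
      · rw [show pvSplitStep (i, e, d, w) x = (i, e ++ [x], d, w) from by
          unfold pvSplitStep; rw [hg]; simp [h2]]
        simp [ih, h2]
      · by_cases h3 : pvG x = some "DEBUG"
        · rw [show pvSplitStep (i, e, d, w) x = (i, e, d ++ [x], w) from by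
            unfold pvSplitStep; rw [hg]; simp [h3]]
          simp [ih, h3]
        · by_cases h4 : pvG x = some "WARNING"
          · rw [show pvSplitStep (i, e, d, w) x = (i, e, d, w ++ [x]) from by
              unfold pvSplitStep; rw [hg]; simp [h4]]
            simp [ih, h4]
          · rw [show pvSplitStep (i, e, d, w) x = (i, e, d, w) from by
              unfold pvSplitStep; rw [hg]; simp [h1, h2, h3, h4]]
            simp [ih, h1, h2, h3, h4]

-- A's count loop over a list whose every element reads level "INFO" adds its length at "INFO"
lemma pv_count_info (l : List (List (String × String)))
    (h : ∀ x ∈ l, pvG x = some "INFO") (a b c d : Int) :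
    l.foldl pvCountStep (PySem.Dict.mk [("INFO", a), ("ERROR", b), ("DEBUG", c), ("WARNING", d)]) =
      PySem.Dict.mk [("INFO", a + l.length), ("ERROR", b), ("DEBUG", c), ("WARNING", d)] := by
  induction l generalizing a with
  | nil => simp
  | cons x l ih =>
    have hx : (PySem.Dict.mk x).get? "level" = some "INFO" := h x List.mem_cons_self
    rw [List.foldl_cons,
        show pvCountStep (PySem.Dict.mk [("INFO", a), ("ERROR", b), ("DEBUG", c), ("WARNING", d)]) x =
          PySem.Dict.mk [("INFO", a + 1), ("ERROR", b), ("DEBUG", c), ("WARNING", d)] from by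
        unfold pvCountStep; rw [hx]
        simp [PySem.Dict.modify, PySem.Dict.insert, PySem.Dict.get?, PySem.Dict.getD],
        ih (fun y hy => h y (List.mem_cons_of_mem x hy))]
    simp only [List.length_cons]
    push_cast
    ring_nf

-- A's count loop over a list whose every element reads level "ERROR" adds its length at "ERROR"
lemma pv_count_error (l : List (List (String × String)))
    (h : ∀ x ∈ l, pvG x = some "ERROR") (a b c d : Int) :
    l.foldl pvCountStep (PySem.Dict.mk [("INFO", a), ("ERROR", b), ("DEBUG", c), ("WARNING", d)]) =
      PySem.Dict.mk [("INFO", a), ("ERROR", b + l.length), ("DEBUG", c), ("WARNING", d)] := by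
  induction l generalizing b with
  | nil => simp
  | cons x l ih =>
    have hx : (PySem.Dict.mk x).get? "level" = some "ERROR" := h x List.mem_cons_self
    rw [List.foldl_cons,
        show pvCountStep (PySem.Dict.mk [("INFO", a), ("ERROR", b), ("DEBUG", c), ("WARNING", d)]) x =
          PySem.Dict.mk [("INFO", a), ("ERROR", b + 1), ("DEBUG", c), ("WARNING", d)] from by
        unfold pvCountStep; rw [hx]
        simp [PySem.Dict.modify, PySem.Dict.insert, PySem.Dict.get?, PySem.Dict.getD],
        ih (fun y hy => h y (List.mem_cons_of_mem x hy))]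
    simp only [List.length_cons]
    push_cast
    ring_nf

-- A's count loop over a list whose every element reads level "DEBUG" adds its length at "DEBUG"
lemma pv_count_debug (l : List (List (String × String)))
    (h : ∀ x ∈ l, pvG x = some "DEBUG") (a b c d : Int) :
    l.foldl pvCountStep (PySem.Dict.mk [("INFO", a), ("ERROR", b), ("DEBUG", c), ("WARNING", d)]) =
      PySem.Dict.mk [("INFO", a), ("ERROR", b), ("DEBUG", c + l.length), ("WARNING", d)] := by
  induction l generalizing c with
  | nil => simp
  | cons x l ih =>
    have hx : (PySem.Dict.mk x).get? "level" = some "DEBUG" := h x List.mem_cons_self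
    rw [List.foldl_cons,
        show pvCountStep (PySem.Dict.mk [("INFO", a), ("ERROR", b), ("DEBUG", c), ("WARNING", d)]) x =
          PySem.Dict.mk [("INFO", a), ("ERROR", b), ("DEBUG", c + 1), ("WARNING", d)] from by
        unfold pvCountStep; rw [hx]
        simp [PySem.Dict.modify, PySem.Dict.insert, PySem.Dict.get?, PySem.Dict.getD],
        ih (fun y hy => h y (List.mem_cons_of_mem x hy))]
    simp only [List.length_cons]
    push_cast
    ring_nf

-- A's count loop over a list whose every element reads level "WARNING" adds its length at "WARNING"
lemma pv_count_warning (l : List (List (String × String)))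
    (h : ∀ x ∈ l, pvG x = some "WARNING") (a b c d : Int) :
    l.foldl pvCountStep (PySem.Dict.mk [("INFO", a), ("ERROR", b), ("DEBUG", c), ("WARNING", d)]) =
      PySem.Dict.mk [("INFO", a), ("ERROR", b), ("DEBUG", c), ("WARNING", d + l.length)] := by
  induction l generalizing d with
  | nil => simp
  | cons x l ih =>
    have hx : (PySem.Dict.mk x).get? "level" = some "WARNING" := h x List.mem_cons_self
    rw [List.foldl_cons,
        show pvCountStep (PySem.Dict.mk [("INFO", a), ("ERROR", b), ("DEBUG", c), ("WARNING", d)]) x =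
          PySem.Dict.mk [("INFO", a), ("ERROR", b), ("DEBUG", c), ("WARNING", d + 1)] from by
        unfold pvCountStep; rw [hx]
        simp [PySem.Dict.modify, PySem.Dict.insert, PySem.Dict.get?, PySem.Dict.getD],
        ih (fun y hy => h y (List.mem_cons_of_mem x hy))]
    simp only [List.length_cons]
    push_cast
    ring_nf

-- B's count loop adds, at each of the four keys, the number of logs reading that level
lemma pv_alt_loop (logs : List (List (String × String))) (a b c d : Int) :
    logs.foldl pvAltStep (PySem.Dict.mk [("INFO", a), ("ERROR", b), ("DEBUG", c), ("WARNING", d)]) =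
      PySem.Dict.mk
        [("INFO", a + logs.countP (fun l => pvG l == some "INFO")),
         ("ERROR", b + logs.countP (fun l => pvG l == some "ERROR")),
         ("DEBUG", c + logs.countP (fun l => pvG l == some "DEBUG")),
         ("WARNING", d + logs.countP (fun l => pvG l == some "WARNING"))] := by
  induction logs generalizing a b c d with
  | nil => simp
  | cons x l ih =>
    rw [List.foldl_cons]
    rcases hx : (PySem.Dict.mk x).get? "level" with _ | s
    · rw [show pvAltStep (PySem.Dict.mk [("INFO", a), ("ERROR", b), ("DEBUG", c), ("WARNING", d)]) x =
          PySem.Dict.mk [("INFO", a), ("ERROR", b), ("DEBUG", c), ("WARNING", d)] from by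
        unfold pvAltStep; rw [hx], ih]
      simp [pvG, hx]
    · by_cases h1 : s = "INFO"
      · subst h1
        rw [show pvAltStep (PySem.Dict.mk [("INFO", a), ("ERROR", b), ("DEBUG", c), ("WARNING", d)]) x =
            PySem.Dict.mk [("INFO", a + 1), ("ERROR", b), ("DEBUG", c), ("WARNING", d)] from by
          unfold pvAltStep; rw [hx]
          simp [PySem.Dict.modify, PySem.Dict.insert, PySem.Dict.get?, PySem.Dict.getD], ih]
        simp only [pvG, List.countP_cons, hx]
        simp
        ring_nf
      · by_cases h2 : s = "ERROR"
        · subst h2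
          rw [show pvAltStep (PySem.Dict.mk [("INFO", a), ("ERROR", b), ("DEBUG", c), ("WARNING", d)]) x =
              PySem.Dict.mk [("INFO", a), ("ERROR", b + 1), ("DEBUG", c), ("WARNING", d)] from by
            unfold pvAltStep; rw [hx]
            simp [PySem.Dict.modify, PySem.Dict.insert, PySem.Dict.get?, PySem.Dict.getD], ih]
          simp only [pvG, List.countP_cons, hx]
          simp
          ring_nf
        · by_cases h3 : s = "DEBUG"
          · subst h3
            rw [show pvAltStep (PySem.Dict.mk [("INFO", a), ("ERROR", b), ("DEBUG", c), ("WARNING", d)]) x =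
                PySem.Dict.mk [("INFO", a), ("ERROR", b), ("DEBUG", c + 1), ("WARNING", d)] from by
              unfold pvAltStep; rw [hx]
              simp [PySem.Dict.modify, PySem.Dict.insert, PySem.Dict.get?, PySem.Dict.getD], ih]
            simp only [pvG, List.countP_cons, hx]
            simp
            ring_nf
          · by_cases h4 : s = "WARNING"
            · subst h4
              rw [show pvAltStep (PySem.Dict.mk [("INFO", a), ("ERROR", b), ("DEBUG", c), ("WARNING", d)]) x =
                  PySem.Dict.mk [("INFO", a), ("ERROR", b), ("DEBUG", c), ("WARNING", d + 1)] from by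
                unfold pvAltStep; rw [hx]
                simp [PySem.Dict.modify, PySem.Dict.insert, PySem.Dict.get?, PySem.Dict.getD], ih]
              simp only [pvG, List.countP_cons, hx]
              simp
              ring_nf
            · rw [show pvAltStep (PySem.Dict.mk [("INFO", a), ("ERROR", b), ("DEBUG", c), ("WARNING", d)]) x =
                  PySem.Dict.mk [("INFO", a), ("ERROR", b), ("DEBUG", c), ("WARNING", d)] from by
                unfold pvAltStep; rw [hx]
                simp [Ne.symm h1, Ne.symm h2, Ne.symm h3, Ne.symm h4], ih]
              simp [pvG, hx, h1, h2, h3, h4]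

-- ===== VERDICT (by name: the statement is the Claim_ definition above) =====
theorem filter_logs_by_level_spec : Claim_equal_filter_logs_by_level := by
  intro logs _
  unfold Spec_filter_logs_by_level filter_logs_by_level filter_logs_by_level_alt count_logs_by_level
  simp only []
  have hmem : ∀ (L : String) (x : List (String × String)),
      x ∈ logs.filter (fun l => pvG l == some L) → pvG x = some L := by
    intro L x hx
    simpa using List.of_mem_filter hx
  have hinit : pvInitCount = PySem.Dict.mk [("INFO", 0), ("ERROR", 0), ("DEBUG", 0), ("WARNING", 0)] := rfl
  have hinit' : PySem.Dict.ofList (pvLevels.map (fun level => (level, (0 : Int)))) =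
      PySem.Dict.mk [("INFO", 0), ("ERROR", 0), ("DEBUG", 0), ("WARNING", 0)] := by decide
  rw [pv_split_loop logs [] [] [] []]
  simp only [List.nil_append]
  rw [hinit, hinit',
      pv_count_info _ (hmem "INFO") 0 0 0 0,
      pv_count_error _ (hmem "ERROR") 0 0 0 0,
      pv_count_debug _ (hmem "DEBUG") 0 0 0 0,
      pv_count_warning _ (hmem "WARNING") 0 0 0 0,
      pv_alt_loop logs 0 0 0 0]
  simp [pvLevels, PySem.Dict.getD, PySem.Dict.get?_mk_cons, List.countP_eq_length_filter]
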